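-- pv_equiv track=rewrite | github.com/ffreemt/ptextpad | ptextpad/zip_longest_middle.py | zip_longest_middle
-- ===== SOURCE A (Python) =====
-- def zip_longest_middle(list1, list2, fillvalue=None):
--     """Do zip_longest with fillvalue in middle."""
--     len1 = len(list1)
--     len2 = len(list2)
--
--     if len1 == len2:
--         out1 = zip(list1, list2)
--     elif len2 > len1:
--         tmp = [fillvalue] * (len2 - len1)
--         out1 = list1[: (len1 + 1) // 2] + tmp + list1[(len1 + 1) // 2:]
--         out1 = zip(out1, list2)
--     else:
--         tmp = [fillvalue] * (len1 - len2)
--         out1 = list2[: (len2 + 1) // 2] + tmp + list2[(len2 + 1) // 2:]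
--         out1 = zip(list1, out1)
--
--     out = []
--     for elm in out1:
--         # out += list(elm)
--         # out += elm  # list of numbers
--         out.append(elm)  # list of tuples
--
--     return out
-- ===== SOURCE B (Python) =====
-- def zip_longest_middle(list1, list2, fillvalue=None):
--     """Zip with the shorter list padded by fillvalue in its middle (positional)."""
--     n1, n2 = len(list1), len(list2)
--     m = max(n1, n2)
--     g = m - min(n1, n2)
--     s = (min(n1, n2) + 1) // 2
--     if n1 <= n2:
--         return [(list1[i] if i < s else fillvalue if i < s + g else list1[i - g],
--                  list2[i]) for i in range(m)]
--     return [(list1[i],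
--              list2[i] if i < s else fillvalue if i < s + g else list2[i - g])
--             for i in range(m)]
-- ===== Notes on version B (the rewrite author's own statement) =====
-- stated objective: alternative
-- what changed: B computes each output pair positionally by index arithmetic (split point s, gap g: shorter[i] if i<s, fillvalue if i<s+g, else shorter[i-g]) in one range loop, instead of A's slice-concatenate of a padded copy of the shorter list followed by zip and an append loop.
import Mathlib
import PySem

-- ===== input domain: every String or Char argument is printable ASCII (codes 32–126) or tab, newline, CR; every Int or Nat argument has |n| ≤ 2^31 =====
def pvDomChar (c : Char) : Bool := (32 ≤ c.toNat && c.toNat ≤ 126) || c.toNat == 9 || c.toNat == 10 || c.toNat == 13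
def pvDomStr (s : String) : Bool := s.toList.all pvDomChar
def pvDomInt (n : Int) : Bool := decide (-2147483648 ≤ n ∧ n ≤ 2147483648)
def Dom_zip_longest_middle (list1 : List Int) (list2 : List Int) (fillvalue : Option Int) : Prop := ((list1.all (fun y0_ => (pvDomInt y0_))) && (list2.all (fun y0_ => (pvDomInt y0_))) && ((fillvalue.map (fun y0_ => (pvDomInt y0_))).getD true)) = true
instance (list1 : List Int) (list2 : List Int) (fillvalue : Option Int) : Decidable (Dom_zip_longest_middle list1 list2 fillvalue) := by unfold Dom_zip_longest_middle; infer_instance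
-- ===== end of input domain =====

-- B rebuilds each output pair by index arithmetic (split point / gap) instead of A's
-- slice-concatenate-then-zip; objective: alternative decomposition, same cost.
-- ===== PORT A =====
-- Python list elements are Int, the fill is fillvalue : Option Int; a tuple component is
-- therefore Option Int (some x for a list element). Slice bounds (len+1)//2 are nonnegative,
-- so List.take/drop are exact for Python's list[:k] / list[k:] here.
def zip_longest_middle (list1 : List Int) (list2 : List Int) (fillvalue : Option Int) : List (Option Int × Option Int) :=
  let len1 := list1.length
  let len2 := list2.length
  if len1 = len2 then
    (list1.map some).zip (list2.map some)
  else if len2 > len1 then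
    let tmp := List.replicate (len2 - len1) fillvalue
    let out1 := (list1.map some).take ((len1 + 1) / 2) ++ tmp ++ (list1.map some).drop ((len1 + 1) / 2)
    out1.zip (list2.map some)
  else
    let tmp := List.replicate (len1 - len2) fillvalue
    let out1 := (list2.map some).take ((len2 + 1) / 2) ++ tmp ++ (list2.map some).drop ((len2 + 1) / 2)
    (list1.map some).zip out1

-- ===== PORT B =====
-- the conditional expression `xs[i] if i < s else fillvalue if i < s + g else xs[i - g]`
-- of Source B; xs[j]? is exact for Python's xs[j] here since every used index is in range.
def pvPickMid (xs : List Int) (fillvalue : Option Int) (s g i : Nat) : Option Int :=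
  if i < s then xs[i]? else if i < s + g then fillvalue else xs[i - g]?

def zip_longest_middle_alt (list1 : List Int) (list2 : List Int) (fillvalue : Option Int) : List (Option Int × Option Int) :=
  let n1 := list1.length
  let n2 := list2.length
  let m := max n1 n2
  let g := m - min n1 n2
  let s := (min n1 n2 + 1) / 2
  if n1 ≤ n2 then
    (List.range m).map (fun i => (pvPickMid list1 fillvalue s g i, list2[i]?))
  else
    (List.range m).map (fun i => (list1[i]?, pvPickMid list2 fillvalue s g i))

-- ===== PRECONDITION & SPEC =====
def Spec_zip_longest_middle (list1 : List Int) (list2 : List Int) (fillvalue : Option Int) (out : List (Option Int × Option Int)) : Prop := out = zip_longest_middle_alt list1 list2 fillvalue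
instance (list1 : List Int) (list2 : List Int) (fillvalue : Option Int) (out : List (Option Int × Option Int)) : Decidable (Spec_zip_longest_middle list1 list2 fillvalue out) := by unfold Spec_zip_longest_middle; infer_instance

-- ===== CLAIM (what is proved, stated in full; the proofs are below) =====
def Claim_equal_zip_longest_middle : Prop := ∀ (list1 : List Int) (list2 : List Int) (fillvalue : Option Int), Dom_zip_longest_middle list1 list2 fillvalue → Spec_zip_longest_middle list1 list2 fillvalue (zip_longest_middle list1 list2 fillvalue)

-- ===== LEMMAS AND PROOFS =====

-- ===== VERDICT (by name: the statement is the Claim_ definition above) =====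
-- zip of two length-n lists, written as a map over range n, given pointwise descriptions
theorem pv_zip_eq_range_map {α β : Type} (a : List α) (b : List β) (n : Nat)
    (ha : a.length = n) (hb : b.length = n) (fa : Nat → α) (fb : Nat → β)
    (h1 : ∀ i, i < n → a[i]? = some (fa i)) (h2 : ∀ i, i < n → b[i]? = some (fb i)) :
    a.zip b = (List.range n).map (fun i => (fa i, fb i)) := by
  apply List.ext_getElem
  · simp [ha, hb]
  · intro i hlt _
    have hi : i < n := by simpa [ha, hb] using hlt
    have e1 : a[i]? = some (fa i) := h1 i hi
    have e2 : b[i]? = some (fb i) := h2 i hi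
    have g1 : a[i]'(by omega) = fa i := by
      have := List.getElem?_eq_getElem (l := a) (i := i) (by omega)
      rw [this] at e1; exact Option.some.inj e1
    have g2 : b[i]'(by omega) = fb i := by
      have := List.getElem?_eq_getElem (l := b) (i := i) (by omega)
      rw [this] at e2; exact Option.some.inj e2
    simp [List.getElem_zip, g1, g2]

-- pointwise description of A's middle-padded list
theorem pv_padded_getElem? (xs : List Int) (fillvalue : Option Int) (s g i : Nat)
    (hs : s ≤ xs.length) (hi : i < xs.length + g) :
    ((xs.map some).take s ++ List.replicate g fillvalue ++ (xs.map some).drop s)[i]? =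
      some (pvPickMid xs fillvalue s g i) := by
  rw [List.append_assoc]
  have hlen : xs.length = (xs.map some).length := by simp
  have htk : ((xs.map some).take s).length = s := by simp; omega
  unfold pvPickMid
  by_cases h1 : i < s
  · rw [List.getElem?_append_left (by omega)]
    rw [List.getElem?_take_of_lt h1, List.getElem?_map,
        List.getElem?_eq_getElem (l := xs) (i := i) (by omega)]
    simp [h1]
  · rw [List.getElem?_append_right (by omega), htk]
    by_cases h2 : i < s + g
    · rw [List.getElem?_append_left (by simp; omega)]
      simp [List.getElem?_replicate, h1, h2]
      omega
    · rw [List.getElem?_append_right (by simp; omega)]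
      simp only [List.length_replicate, List.getElem?_drop, List.getElem?_map]
      have : s + (i - s - g) = i - g := by omega
      rw [this]
      rw [List.getElem?_eq_getElem (l := xs) (i := i - g) (by omega)]
      simp [h1, h2]

theorem pv_map_some_getElem? (xs : List Int) (i : Nat) (h : i < xs.length) :
    (xs.map some)[i]? = some (xs[i]?) := by
  rw [List.getElem?_map, List.getElem?_eq_getElem h]
  simp

theorem pvPickMid_gap_zero (xs : List Int) (fillvalue : Option Int) (s i : Nat) :
    pvPickMid xs fillvalue s 0 i = xs[i]? := by
  unfold pvPickMid
  split_ifs with h1 h2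
  · rfl
  · omega
  · simp

theorem zip_longest_middle_spec : Claim_equal_zip_longest_middle := by
  intro list1 list2 fillvalue _
  show zip_longest_middle list1 list2 fillvalue = zip_longest_middle_alt list1 list2 fillvalue
  unfold zip_longest_middle zip_longest_middle_alt
  rcases Nat.lt_trichotomy list1.length list2.length with h | h | h
  · have hne : list1.length ≠ list2.length := by omega
    have hle : list1.length ≤ list2.length := Nat.le_of_lt h
    simp only [if_neg hne, if_pos h, if_pos hle, Nat.min_eq_left hle, Nat.max_eq_right hle,
      gt_iff_lt]
    exact pv_zip_eq_range_map _ _ list2.length (by simp; omega) (by simp) _ _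
      (fun i hi => pv_padded_getElem? list1 fillvalue ((list1.length + 1) / 2)
        (list2.length - list1.length) i (by omega) (by omega))
      (fun i hi => pv_map_some_getElem? list2 i hi)
  · simp only [h, Nat.min_self, Nat.max_self, Nat.sub_self, le_refl, if_pos]
    exact pv_zip_eq_range_map _ _ list2.length (by simpa using h) (by simp) _ _
      (fun i hi => by
        rw [pvPickMid_gap_zero]
        exact pv_map_some_getElem? list1 i (by omega))
      (fun i hi => pv_map_some_getElem? list2 i hi)
  · have hne : list1.length ≠ list2.length := by omega
    have hnle : ¬ list1.length ≤ list2.length := by omega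
    have hle : list2.length ≤ list1.length := Nat.le_of_lt h
    simp only [if_neg hne, if_neg (by omega : ¬ list2.length > list1.length), if_neg hnle,
      Nat.min_eq_right hle, Nat.max_eq_left hle]
    exact pv_zip_eq_range_map _ _ list1.length (by simp) (by simp; omega) _ _
      (fun i hi => pv_map_some_getElem? list1 i hi)
      (fun i hi => pv_padded_getElem? list2 fillvalue ((list2.length + 1) / 2)
        (list1.length - list2.length) i (by omega) (by omega))
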